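-- pv_equiv track=rewrite | github.com/Spandan2003/legalLLM | hall_detect/factscore2.py | build_history_query_pairs
-- ===== SOURCE A (Python) =====
-- def build_history_query_pairs(elements):
--     """
--     Recursively creates history-query pairs from the list of elements.
--
--     Parameters:
--         elements (list of str): List of chat elements, alternating between "AI:" and "Human:".
--
--     Returns:
--         list of dict: A list where each entry contains:
--             - "history": The history up to the current query.
--             - "query": The latest user input.
--     """
--     pairs = []
--
--     for i in range(len(elements)):
--         # Only process when a Human message is found
--         if elements[i].startswith("AI:") and i>0:
--             query = elements[i-1].replace("Human:", "").strip()
--             history = "\n".join(elements[:i-1]).strip()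
--             response = elements[i].replace("AI:", "").strip()
--             pairs.append({
--                 "history": history,
--                 "query": query,
--                 "response": response
--             })
--
--     return pairs
-- ===== SOURCE B (Python) =====
-- def build_history_query_pairs(elements):
--     pairs = []
--     hist = ""   # running "\n".join(elements[:i-1])
--     prev = None
--     for i, e in enumerate(elements):
--         if i > 0 and e.startswith("AI:"):
--             pairs.append({
--                 "history": hist.strip(),
--                 "query": prev.replace("Human:", "").strip(),
--                 "response": e.replace("AI:", "").strip()
--             })
--         if i >= 1:
--             if i == 1:
--                 hist = prev
--             else:
--                 hist += "\n" + prev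
--         prev = e
--     return pairs
-- ===== Notes on version B (the rewrite author's own statement) =====
-- stated objective: alternative
-- what changed: B makes one enumerate pass that carries the joined history prefix and the previous element as running state, instead of A's index loop that re-slices and re-joins the whole prefix at every AI hit.
import Mathlib
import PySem

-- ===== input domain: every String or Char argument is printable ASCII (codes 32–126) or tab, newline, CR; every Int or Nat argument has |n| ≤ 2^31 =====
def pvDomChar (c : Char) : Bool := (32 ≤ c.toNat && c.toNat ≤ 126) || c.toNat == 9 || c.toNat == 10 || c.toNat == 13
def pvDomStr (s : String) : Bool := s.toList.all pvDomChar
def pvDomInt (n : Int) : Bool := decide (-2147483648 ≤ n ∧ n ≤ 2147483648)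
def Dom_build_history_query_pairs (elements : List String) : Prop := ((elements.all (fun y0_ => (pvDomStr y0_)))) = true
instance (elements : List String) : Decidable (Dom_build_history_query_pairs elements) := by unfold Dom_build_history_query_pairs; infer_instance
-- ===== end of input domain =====

-- B maintains the joined history prefix and the previous element as running state in one
-- enumerate pass, instead of A's per-hit re-slice-and-re-join of the prefix; objective: alternative.

-- ===== PORT A =====
-- loop body of A's 'for i in range(len(elements))'
def pvStepA (elements : List String) (pairs : List (List (String × String))) (i : Int) :
    List (List (String × String)) :=
  if PySem.Str.startswith (PySem.List.pyGetD elements i "") "AI:" && decide (0 < i) then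
    pairs ++ [[("history", PySem.Str.strip (PySem.Str.join "\n" (PySem.List.slice elements none (some (i - 1))))),
               ("query", PySem.Str.strip (PySem.Str.replace (PySem.List.pyGetD elements (i - 1) "") "Human:" "")),
               ("response", PySem.Str.strip (PySem.Str.replace (PySem.List.pyGetD elements i "") "AI:" ""))]]
  else pairs

def build_history_query_pairs (elements : List String) : List (List (String × String)) :=
  (PySem.List.pyRange 0 (elements.length : Int) 1).foldl (pvStepA elements) []

-- ===== PORT B =====
-- loop body of B's 'for i, e in enumerate(elements)'; state = (pairs, running joined prefix, previous element)
def pvStepB (st : List (List (String × String)) × String × Option String) (ie : Int × String) :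
    List (List (String × String)) × String × Option String :=
  let pairs := st.1
  let hist := st.2.1
  let prev := st.2.2
  let i := ie.1
  let e := ie.2
  let pairs' :=
    if decide (0 < i) && PySem.Str.startswith e "AI:" then
      pairs ++ [[("history", PySem.Str.strip hist),
                 ("query", PySem.Str.strip (PySem.Str.replace (prev.getD "") "Human:" "")),
                 ("response", PySem.Str.strip (PySem.Str.replace e "AI:" ""))]]
    else pairs
  let hist' :=
    if decide (1 ≤ i) then
      (if i = 1 then prev.getD "" else PySem.Str.join "\n" [hist, prev.getD ""])
    else hist
  (pairs', hist', some e)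

def build_history_query_pairs_alt (elements : List String) : List (List (String × String)) :=
  ((PySem.List.enumerate elements 0).foldl pvStepB ([], "", none)).1

-- ===== PRECONDITION & SPEC =====
def Spec_build_history_query_pairs (elements : List String) (out : List (List (String × String))) : Prop := out = build_history_query_pairs_alt elements
instance (elements : List String) (out : List (List (String × String))) : Decidable (Spec_build_history_query_pairs elements out) := by unfold Spec_build_history_query_pairs; infer_instance

-- ===== CLAIM (what is proved, stated in full; the proofs are below) =====
def Claim_equal_build_history_query_pairs : Prop := ∀ (elements : List String), Dom_build_history_query_pairs elements → Spec_build_history_query_pairs elements (build_history_query_pairs elements)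

-- ===== LEMMAS AND PROOFS =====

lemma pv_join_snoc_chars (s : List Char) :
    ∀ (xs : List (List Char)) (y : List Char), xs ≠ [] →
      PySem.Chars.join s (xs ++ [y]) = PySem.Chars.join s xs ++ s ++ y := by
  intro xs
  induction xs with
  | nil => intro y h; exact absurd rfl h
  | cons a t ih =>
    intro y _
    cases t with
    | nil => simp [PySem.Chars.join_cons_cons, PySem.Chars.join_singleton]
    | cons b t' =>
      simp only [List.cons_append] at *
      rw [PySem.Chars.join_cons_cons, PySem.Chars.join_cons_cons, ih y (by simp)]
      simp [List.append_assoc]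

lemma pv_join_snoc (pre : List String) (p : String) (h : pre ≠ []) :
    PySem.Str.join "\n" (pre ++ [p]) = PySem.Str.join "\n" [PySem.Str.join "\n" pre, p] := by
  apply String.toList_inj.mp
  simp only [PySem.Str.toList_join, List.map_append, List.map_cons, List.map_nil]
  rw [pv_join_snoc_chars _ _ _ (by simp [h]),
    PySem.Chars.join_cons_cons, PySem.Chars.join_singleton]

lemma pv_getD_mid (pre : List String) (p : String) (rest : List String) (k : Nat) :
    PySem.List.pyGetD (pre ++ [p] ++ rest) ((pre.length : Int) + k) "" = ([p] ++ rest).getD k "" := by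
  have : ((pre.length : Int) + k) = ((pre.length + k : Nat) : Int) := by push_cast; ring
  rw [this, PySem.List.pyGetD_natCast]
  simp [List.getD, List.append_assoc, List.getElem?_append_right]

lemma pv_loop_eq (elements : List String) :
    ∀ (rest pre : List String) (p : String) (pairs : List (List (String × String))),
      elements = pre ++ [p] ++ rest →
      (PySem.List.pyRange ((pre.length : Int) + 1) (elements.length : Int) 1).foldl
          (pvStepA elements) pairs
        = ((PySem.List.enumerate rest ((pre.length : Int) + 1)).foldl pvStepB
            (pairs, PySem.Str.join "\n" pre, some p)).1 := by
  intro rest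
  induction rest with
  | nil =>
    intro pre p pairs hel
    subst hel
    rw [PySem.List.pyRange_one_eq_nil (by simp)]
    simp [PySem.List.enumerate]
  | cons e rest' ih =>
    intro pre p pairs hel
    have hlen : ((pre ++ [p] ++ e :: rest').length : Int) = (pre.length : Int) + 2 + rest'.length := by
      simp; omega
    subst hel
    rw [PySem.List.pyRange_one_cons (by rw [hlen]; omega), List.foldl_cons,
      PySem.List.enumerate_cons, List.foldl_cons]
    -- identify the two step results
    have hget1 : PySem.List.pyGetD (pre ++ [p] ++ e :: rest') ((pre.length : Int) + 1) "" = e := by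
      simpa using pv_getD_mid pre p (e :: rest') 1
    have hget0 : PySem.List.pyGetD (pre ++ [p] ++ e :: rest') ((pre.length : Int) + 1 - 1) "" = p := by
      simpa using pv_getD_mid pre p (e :: rest') 0
    have hslice : PySem.List.slice (pre ++ [p] ++ e :: rest') none (some ((pre.length : Int) + 1 - 1)) = pre := by
      have : ((pre.length : Int) + 1 - 1) = ((pre.length : Nat) : Int) := by ring
      rw [this, PySem.List.slice_to_natCast]
      simp [List.append_assoc]
    have hstepA : pvStepA (pre ++ [p] ++ e :: rest') pairs ((pre.length : Int) + 1)
        = (pvStepB (pairs, PySem.Str.join "\n" pre, some p) ((pre.length : Int) + 1, e)).1 := by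
      simp only [pvStepA, pvStepB, hget1, hget0, hslice]
      simp [Option.getD]
    have hhist : (pvStepB (pairs, PySem.Str.join "\n" pre, some p) ((pre.length : Int) + 1, e)).2.1
        = PySem.Str.join "\n" (pre ++ [p]) := by
      simp only [pvStepB]
      have h1 : decide ((1 : Int) ≤ (pre.length : Int) + 1) = true := by simp
      simp only [h1, if_true]
      by_cases hpre : pre = []
      · subst hpre; simp [PySem.Str.join]
      · have hne : ((pre.length : Int) + 1) ≠ 1 := by
          intro h
          exact hpre (List.eq_nil_of_length_eq_zero (by omega))
        rw [if_neg hne]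
        simp [Option.getD, pv_join_snoc pre p hpre]
    have hprev : (pvStepB (pairs, PySem.Str.join "\n" pre, some p) ((pre.length : Int) + 1, e)).2.2 = some e := by
      simp [pvStepB]
    have hIH := ih (pre ++ [p]) e
      ((pvStepB (pairs, PySem.Str.join "\n" pre, some p) ((pre.length : Int) + 1, e)).1)
      (by simp)
    have hcast : ((pre ++ [p]).length : Int) + 1 = (pre.length : Int) + 2 := by simp; ring
    rw [hcast] at hIH
    rw [hstepA]
    rw [show (pre.length : Int) + 1 + 1 = (pre.length : Int) + 2 by ring]
    rw [hIH]
    congr 1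
    rw [← hhist, ← hprev]

-- ===== VERDICT (by name: the statement is the Claim_ definition above) =====
theorem build_history_query_pairs_spec : Claim_equal_build_history_query_pairs := by
  intro elements _
  unfold Spec_build_history_query_pairs build_history_query_pairs build_history_query_pairs_alt
  cases elements with
  | nil => simp [PySem.List.pyRange_one_eq_nil, PySem.List.enumerate]
  | cons e rest =>
    rw [PySem.List.pyRange_one_cons (by simp), List.foldl_cons,
      PySem.List.enumerate_cons, List.foldl_cons]
    have hA : pvStepA (e :: rest) [] 0 = [] := by simp [pvStepA]
    have hB : pvStepB ([], "", none) (0, e) = ([], "", some e) := by simp [pvStepB]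
    rw [hA, hB]
    have h := pv_loop_eq (e :: rest) rest [] e [] (by simp)
    simpa [PySem.Str.join] using h
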